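-- pv_equiv track=rewrite | github.com/rileymprice/Advent_Of_Code | 2022/01/solution.py | calculate_elves
-- ===== SOURCE A (Python) =====
-- def calculate_elves(lines):
--     elves = []
--     total = 0
--     for line in lines:
--         if line:
--             total += int(line)
--         else:
--             elves.append(total)
--             total = 0
--     return elves
-- ===== SOURCE B (Python) =====
-- def calculate_elves(lines):
--     blanks = [i for i, line in enumerate(lines) if not line]
--     values = [int(line) if line else 0 for line in lines]
--     return [sum(values[s:b]) for s, b in zip([0] + [b + 1 for b in blanks], blanks)]
-- ===== Notes on version B (the rewrite author's own statement) =====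
-- stated objective: alternative
-- what changed: B replaces A's single running-total-with-reset accumulator by a three-step decomposition: collect the blank-line indices, parse every line once into a values list, and emit one slice-sum per blank boundary.
import Mathlib
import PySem

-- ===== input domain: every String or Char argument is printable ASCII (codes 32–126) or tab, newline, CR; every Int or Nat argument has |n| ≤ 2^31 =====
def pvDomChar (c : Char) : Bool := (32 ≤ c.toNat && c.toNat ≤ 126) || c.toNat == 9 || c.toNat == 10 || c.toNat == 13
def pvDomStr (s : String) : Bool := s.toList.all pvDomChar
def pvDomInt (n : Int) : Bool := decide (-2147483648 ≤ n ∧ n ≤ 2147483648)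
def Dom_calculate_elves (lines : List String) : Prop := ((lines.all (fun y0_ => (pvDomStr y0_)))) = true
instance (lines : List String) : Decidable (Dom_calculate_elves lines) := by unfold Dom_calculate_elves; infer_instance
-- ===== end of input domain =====

-- B replaces A's running-total-with-reset accumulator by a boundary decomposition: blank indices,
-- a parsed values list, and one slice-sum per blank boundary (objective: alternative; equal cost).


-- ===== PORT A =====
-- int(line); Pre_ guarantees parsing succeeds on every non-blank line, so getD 0 is never hit inside Pre_.
def pvParse (s : String) : Int := (PySem.Int.ofStr? s).getD 0

def pvStepA (st : List Int × Int) (line : String) : List Int × Int :=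
  if line ≠ "" then (st.1, st.2 + pvParse line) else (st.1 ++ [st.2], 0)

def calculate_elves (lines : List String) : List Int :=
  (lines.foldl pvStepA ([], 0)).1

-- ===== PORT B =====
def calculate_elves_alt (lines : List String) : List Int :=
  let blanks := ((PySem.List.enumerate lines 0).filter (fun p => p.2 == "")).map (fun p => p.1)
  let values := lines.map (fun line => if line ≠ "" then pvParse line else 0)
  (List.zip ((0 : Int) :: blanks.map (fun b => b + 1)) blanks).map
    (fun sb => (PySem.List.slice values (some sb.1) (some sb.2)).sum)

-- ===== PRECONDITION & SPEC =====
-- Pre_ excludes exactly the inputs where Python A raises ValueError: a non-blank line int() rejects.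
def Pre_calculate_elves (lines : List String) : Prop :=
  ∀ l ∈ lines, l ≠ "" → (PySem.Int.ofStr? l).isSome = true
instance (lines : List String) : Decidable (Pre_calculate_elves lines) := by
  unfold Pre_calculate_elves; infer_instance

def pvWitness_calculate_elves : List String := ["1", "2", "", " 3 ", "", "", "+4", ""]

def Spec_calculate_elves (lines : List String) (out : List Int) : Prop := out = calculate_elves_alt lines
instance (lines : List String) (out : List Int) : Decidable (Spec_calculate_elves lines out) := by unfold Spec_calculate_elves; infer_instance

-- ===== CLAIM (what is proved, stated in full; the proofs are below) =====
def Claim_equal_calculate_elves : Prop := ∀ (lines : List String), Dom_calculate_elves lines → Pre_calculate_elves lines → Spec_calculate_elves lines (calculate_elves lines)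

-- ===== LEMMAS AND PROOFS =====

-- proof-side name for B's blank-index comprehension, generalised to an arbitrary enumerate start
def pvBlanks (xs : List String) (n : Int) : List Int :=
  ((PySem.List.enumerate xs n).filter (fun p => p.2 == "")).map (fun p => p.1)

theorem pvBlanks_cons (l : String) (ls : List String) (n : Int) :
    pvBlanks (l :: ls) n = if l = "" then n :: pvBlanks ls (n + 1) else pvBlanks ls (n + 1) := by
  simp only [pvBlanks, PySem.List.enumerate_cons, List.filter_cons]
  by_cases hl : l = "" <;> simp [hl]

-- Python's int("") raises, so pvParse "" = getD-default 0 = B's explicit 0: the two parse maps agree.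
theorem pvVal_eq : (fun line => if line ≠ "" then pvParse line else 0) = pvParse := by
  funext l
  by_cases hl : l = ""
  · subst hl; decide
  · simp [hl]

theorem pv_slice_prefix (pre rest : List String) (s : Nat) (hs : s ≤ pre.length) :
    PySem.List.slice ((pre ++ rest).map pvParse) (some (s : Int)) (some (pre.length : Int))
      = (pre.drop s).map pvParse := by
  rw [PySem.List.slice_natCast, List.map_append]
  rw [List.drop_append_of_le_length (by simpa using hs)]
  rw [List.take_append_of_le_length (by simp)]
  rw [← List.map_drop]
  exact List.take_of_length_le (by simp)

-- Invariant: with the prefix pre already consumed and the current group starting at index s ≤ |pre|,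
-- A's accumulator total equals the parsed sum of pre[s:], and finishing A's fold over the suffix ls
-- appends exactly B's slice-sums for the blank boundaries found in ls.
theorem pv_key (ls : List String) : ∀ (pre : List String) (acc : List Int) (s : Nat),
    s ≤ pre.length →
    (ls.foldl pvStepA (acc, ((pre.drop s).map pvParse).sum)).1
      = acc ++ (List.zip ((s : Int) :: (pvBlanks ls (pre.length : Int)).map (fun b => b + 1))
            (pvBlanks ls (pre.length : Int))).map
          (fun sb => (PySem.List.slice ((pre ++ ls).map pvParse) (some sb.1) (some sb.2)).sum) := by
  induction ls with
  | nil => intro pre acc s _; simp [pvBlanks, PySem.List.enumerate_nil]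
  | cons l ls ih =>
    intro pre acc s hs
    rw [pvBlanks_cons]
    by_cases hl : l = ""
    · subst hl
      rw [if_pos rfl]
      simp only [List.foldl_cons]
      have hstep : pvStepA (acc, ((pre.drop s).map pvParse).sum) ""
          = (acc ++ [((pre.drop s).map pvParse).sum], 0) := by simp [pvStepA]
      rw [hstep]
      have h2 := ih (pre ++ [""]) (acc ++ [((pre.drop s).map pvParse).sum]) (pre.length + 1)
        (by simp)
      have h0 : ((((pre ++ [""]).drop (pre.length + 1)).map pvParse).sum : Int) = 0 := by simp
      rw [h0] at h2
      simp only [List.length_append, List.length_cons, List.length_nil] at h2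
      push_cast at h2
      rw [show (pre ++ [""]) ++ ls = pre ++ "" :: ls by simp] at h2
      rw [h2]
      simp only [List.map_cons, List.zip_cons_cons, List.map_cons]
      rw [pv_slice_prefix pre ("" :: ls) s hs]
      simp
    · rw [if_neg hl]
      simp only [List.foldl_cons]
      have hstep : pvStepA (acc, ((pre.drop s).map pvParse).sum) l
          = (acc, (((pre ++ [l]).drop s).map pvParse).sum) := by
        rw [List.drop_append_of_le_length hs]
        simp [pvStepA, hl]
      rw [hstep]
      have h2 := ih (pre ++ [l]) acc s (by simp; omega)
      simp only [List.length_append, List.length_cons, List.length_nil] at h2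
      push_cast at h2
      rw [show (pre ++ [l]) ++ ls = pre ++ l :: ls by simp] at h2
      exact h2

-- ===== VERDICT (by name: the statement is the Claim_ definition above) =====
theorem calculate_elves_spec : Claim_equal_calculate_elves := by
  intro lines _ _
  unfold Spec_calculate_elves calculate_elves calculate_elves_alt
  rw [pvVal_eq]
  have h := pv_key lines [] [] 0 (by simp)
  simpa [pvBlanks] using h
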